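-- pv_equiv track=rewrite | github.com/jahnavi95/DP_Practice_Problems | strings.py | brackets_evaluation
-- ===== SOURCE A (Python) =====
-- from collections import deque
--
-- def brackets_evaluation(a):
--     """
--
--     :param a: Identify and mark unmatched parenthesis in an expression
--     :return:
--     """
--     s = deque()
--     a1 = list(a)
--     index = [None] * len(a1)
--     for i, item in enumerate(a1):
--         if item == "(":
--             s.append(item)
--             index.append(i)
--         elif item == ")":
--             if len(s) == 0:
--                 a1[i] = "-1"
--             else:
--                 s.pop()
--                 j = index.pop()
--                 a1[j] = "0"
--                 a1[i] = "1"
--         else: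
--             a1[i] = item
--
--     final = "".join(a1)
--     final = final.replace("(", "-1")
--     return final
-- ===== SOURCE B (Python) =====
-- def brackets_evaluation(a):
--     """
--
--     :param a: Identify and mark unmatched parenthesis in an expression
--     :return:
--     """
--     out = list(a)
--     bal = 0
--     for i, c in enumerate(a):
--         if c == "(":
--             bal += 1
--         elif c == ")":
--             if bal > 0:
--                 bal -= 1
--                 out[i] = "1"
--             else:
--                 out[i] = "-1"
--     r = 0
--     for i in range(len(a) - 1, -1, -1):
--         c = a[i]
--         if c == ")":
--             r += 1
--         elif c == "(":
--             if r > 0: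
--                 r -= 1
--                 out[i] = "0"
--             else:
--                 out[i] = "-1"
--     return "".join(out)
-- ===== Notes on version B (the rewrite author's own statement) =====
-- stated objective: simpler
-- what changed: Replaces A's deque stack plus parallel index list and the final str.replace post-pass by two plain counting passes: a left-to-right balance counter labels the closing brackets, a right-to-left counter labels the excess unmatched opening brackets, writing labels in place.
import Mathlib
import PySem

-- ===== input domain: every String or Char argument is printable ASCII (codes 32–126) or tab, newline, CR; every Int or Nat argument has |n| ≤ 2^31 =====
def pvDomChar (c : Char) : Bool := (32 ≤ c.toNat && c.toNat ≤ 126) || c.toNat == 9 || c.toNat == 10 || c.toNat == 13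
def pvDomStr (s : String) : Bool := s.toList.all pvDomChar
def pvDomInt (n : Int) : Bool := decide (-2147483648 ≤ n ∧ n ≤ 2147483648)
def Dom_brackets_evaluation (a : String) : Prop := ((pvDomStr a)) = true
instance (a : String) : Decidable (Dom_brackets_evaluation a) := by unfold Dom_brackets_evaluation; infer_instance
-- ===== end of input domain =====

-- B replaces A's deque/index-list stack by two counting passes (a balance counter
-- left-to-right for ')' and a counter right-to-left for the excess '('); objective: simpler.

-- one Python character as a length-1 string (list(a) element)
def pvSC (c : Char) : String := String.ofList [c]

-- ===== PORT A =====
-- loop body of A, state (s, index, a1); j = index.pop() is always an int in Python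
-- (a None pop would raise; it is unreachable), read here via getD
def pvStepA (st : List String × List (Option Int) × List String) (p : Int × String) :
    List String × List (Option Int) × List String :=
  let s := st.1; let index := st.2.1; let a1 := st.2.2
  let i := p.1; let item := p.2
  if item = "(" then (s ++ [item], index ++ [some i], a1)
  else if item = ")" then
    if s.length = 0 then (s, index, a1.set i.toNat "-1")
    else
      let j := (index.getLast?.getD none).getD 0
      (s.dropLast, index.dropLast, (a1.set j.toNat "0").set i.toNat "1")
  else (s, index, a1.set i.toNat item)

def brackets_evaluation (a : String) : String :=
  let a1 : List String := a.toList.map pvSC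
  let index : List (Option Int) := List.replicate a1.length none
  let st := (PySem.List.enumerate a1).foldl pvStepA ([], index, a1)
  let final := PySem.Str.join "" st.2.2
  PySem.Str.replace final "(" "-1"

-- ===== PORT B =====
-- pass 1 of Source B: '(' raises the balance, ')' is matched ("1") iff the balance is positive
def pvStepB1 (st : List String × Int) (p : Int × Char) : List String × Int :=
  let i := p.1; let c := p.2
  if c = '(' then (st.1, st.2 + 1)
  else if c = ')' then
    if st.2 > 0 then (st.1.set i.toNat "1", st.2 - 1) else (st.1.set i.toNat "-1", st.2)
  else st

-- pass 2 of Source B (right-to-left): ')' raises r, '(' is matched ("0") iff r is positive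
def pvStepB2 (st : List String × Int) (p : Int × Char) : List String × Int :=
  let i := p.1; let c := p.2
  if c = ')' then (st.1, st.2 + 1)
  else if c = '(' then
    if st.2 > 0 then (st.1.set i.toNat "0", st.2 - 1) else (st.1.set i.toNat "-1", st.2)
  else st

def brackets_evaluation_alt (a : String) : String :=
  let out0 : List String := a.toList.map pvSC
  let p1 := (PySem.List.enumerate a.toList).foldl pvStepB1 (out0, 0)
  let p2 := ((PySem.List.enumerate a.toList).reverse).foldl pvStepB2 (p1.1, 0)
  PySem.Str.join "" p2.1

-- ===== PRECONDITION & SPEC =====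
def Spec_brackets_evaluation (a : String) (out : String) : Prop := out = brackets_evaluation_alt a
instance (a : String) (out : String) : Decidable (Spec_brackets_evaluation a out) := by unfold Spec_brackets_evaluation; infer_instance

-- ===== CLAIM (what is proved, stated in full; the proofs are below) =====
def Claim_equal_brackets_evaluation : Prop := ∀ (a : String), Dom_brackets_evaluation a → Spec_brackets_evaluation a (brackets_evaluation a)

-- ===== LEMMAS AND PROOFS =====

-- clamped right-to-left counter: pvRcount cs r = value of B's r after scanning cs right-to-left starting from r
def pvRcount (cs : List Char) (r : Nat) : Nat :=
  match cs with
  | [] => r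
  | c :: t => if c = ')' then pvRcount t r + 1 else if c = '(' then pvRcount t r - 1 else pvRcount t r

-- number of unmatched ')' in cs when the stack initially holds b opens
def pvG (b : Nat) (cs : List Char) : Nat :=
  match cs with
  | [] => 0
  | c :: t =>
    if c = '(' then pvG (b + 1) t
    else if c = ')' then (if b = 0 then pvG 0 t + 1 else pvG (b - 1) t)
    else pvG b t

-- common label oracle: uo/mo are the labels of an unmatched/matched '(' ; b = current open balance
def pvL (uo mo : String) (cs : List Char) (b : Nat) : List String :=
  match cs with
  | [] => []
  | c :: t =>
    (if c = '(' then (if pvRcount t 0 = 0 then uo else mo)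
     else if c = ')' then (if b = 0 then "-1" else "1")
     else pvSC c) ::
    pvL uo mo t (if c = '(' then b + 1 else if c = ')' then b - 1 else b)

-- front positions popped by A get "0"
def pvZero (front : List String) (ks : List Nat) : List String :=
  ks.foldl (fun f k => f.set k "0") front

-- pass-1 oracle of B
def pvP1 (cs : List Char) (b : Nat) : List String :=
  match cs with
  | [] => []
  | c :: t =>
    (if c = '(' then pvSC c
     else if c = ')' then (if b = 0 then "-1" else "1")
     else pvSC c) ::
    pvP1 t (if c = '(' then b + 1 else if c = ')' then b - 1 else b)

-- pass-2 oracle of B: relabel the '(' entries using the right counter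
def pvM2 (cs : List Char) (r : Nat) (out : List String) : List String :=
  match cs, out with
  | c :: t, o :: os => (if c = '(' then (if pvRcount t r > 0 then "0" else "-1") else o) :: pvM2 t r os
  | _, out => out

theorem pvSC_eq_iff (c d : Char) : (pvSC c = pvSC d) ↔ c = d := by
  constructor
  · intro h
    have := congrArg String.toList h
    simp [pvSC, String.toList_ofList] at this
    exact this
  · intro h; subst h; rfl

theorem pvSC_eq_paren (c : Char) : (pvSC c = "(") ↔ c = '(' := pvSC_eq_iff c '('
theorem pvSC_eq_close (c : Char) : (pvSC c = ")") ↔ c = ')' := pvSC_eq_iff c ')'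

theorem pvSC_open : pvSC '(' = "(" := rfl
theorem pvSC_close : pvSC ')' = ")" := rfl

theorem pvG_open (b : Nat) (t : List Char) : pvG b ('(' :: t) = pvG (b + 1) t := by
  simp [pvG]

theorem pvG_close (b : Nat) (t : List Char) :
    pvG b (')' :: t) = if b = 0 then pvG 0 t + 1 else pvG (b - 1) t := by
  simp [pvG]

theorem pvG_other (c : Char) (h1 : c ≠ '(') (h2 : c ≠ ')') (b : Nat) (t : List Char) :
    pvG b (c :: t) = pvG b t := by
  simp [pvG, h1, h2]

theorem pvG_eq (cs : List Char) : ∀ b, pvG b cs = pvRcount cs 0 - b := by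
  induction cs with
  | nil => intro b; simp [pvG, pvRcount]
  | cons c t ih =>
    intro b
    by_cases hc : c = '('
    · simp [pvG, pvRcount, hc, ih]; omega
    · by_cases hc2 : c = ')'
      · by_cases hb : b = 0 <;> simp [pvG, pvRcount, hc, hc2, hb, ih] <;> omega
      · simp [pvG, pvRcount, hc, hc2, ih]

theorem pvRcount_concat (es : List Char) (c : Char) (r : Nat) :
    pvRcount (es ++ [c]) r =
      pvRcount es (if c = ')' then r + 1 else if c = '(' then r - 1 else r) := by
  induction es with
  | nil => simp [pvRcount]
  | cons e t ih => simp [pvRcount, ih]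

theorem pvZero_append (G : List String) : ∀ (ks : List Nat) (F : List String),
    (∀ k ∈ ks, k < F.length) → pvZero (F ++ G) ks = pvZero F ks ++ G := by
  intro ks
  induction ks with
  | nil => intro F _; simp [pvZero]
  | cons k t ih =>
    intro F hk
    have hklt : k < F.length := hk k (by simp)
    simp only [pvZero, List.foldl_cons]
    rw [List.set_append, if_pos hklt]
    have := ih (F.set k "0") (by intro x hx; simpa using hk x (by simp [hx]))
    simpa [pvZero] using this

theorem pvZero_set_comm (v : String) : ∀ (ks : List Nat) (F : List String) (k : Nat), k ∉ ks →
    pvZero (F.set k v) ks = (pvZero F ks).set k v := by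
  intro ks
  induction ks with
  | nil => intro F k _; simp [pvZero]
  | cons j t ih =>
    intro F k hk
    have hkj : k ≠ j := by simp at hk; exact hk.1
    simp only [pvZero, List.foldl_cons]
    rw [List.set_comm _ _ hkj]
    exact ih (F.set j "0") k (by simp at hk; exact hk.2)

theorem pvZero_concat (F : List String) (ks : List Nat) (j : Nat) :
    pvZero F (ks ++ [j]) = (pvZero F ks).set j "0" := by
  simp [pvZero]

theorem pvSetMid (F R : List String) (x v : String) :
    (F ++ x :: R).set F.length v = F ++ v :: R := by
  rw [List.set_append]
  simp

theorem pvZero_length : ∀ (ks : List Nat) (F : List String), (pvZero F ks).length = F.length := by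
  intro ks
  induction ks with
  | nil => intro F; rfl
  | cons k t ih => intro F; simp only [pvZero, List.foldl_cons]; rw [show (t.foldl (fun f k => f.set k "0") (F.set k "0")) = pvZero (F.set k "0") t from rfl, ih]; simp

theorem pvSetLeft (F R : List String) (j : Nat) (v : String) (h : j < F.length) :
    (F ++ R).set j v = F.set j v ++ R := by
  rw [List.set_append, if_pos h]

-- ===== A-side: the main loop invariant =====
theorem pvA_loop : ∀ (t : List Char) (front : List String) (stkS : List Nat) (pad : List (Option Int)),
    (∀ k ∈ stkS, k < front.length) → stkS.Pairwise (· < ·) →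
    ((PySem.List.enumerate ((t.map pvSC)) (front.length : Int)).foldl pvStepA
      (List.replicate stkS.length "(", pad ++ stkS.map (fun k => some ((k : Nat) : Int)), front ++ t.map pvSC)).2.2
    = pvZero front (stkS.drop (stkS.length - pvG 0 t)) ++ pvL "(" "0" t stkS.length := by
  intro t
  induction t with
  | nil =>
    intro front stkS pad _ _
    simp [PySem.List.enumerate, pvG, pvL, pvZero]
  | cons c t ih =>
    intro front stkS pad hbnd hpw
    simp only [List.map_cons]
    rw [PySem.List.enumerate_cons, List.foldl_cons]
    have hlen : ∀ x : String, ((front.length : Int) + 1) = (((front ++ [x]).length : Int)) := by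
      intro x; simp
    by_cases hc : c = '('
    · -- push
      subst hc
      have hstep : pvStepA (List.replicate stkS.length "(",
            pad ++ stkS.map (fun k => some ((k : Nat) : Int)), front ++ pvSC '(' :: t.map pvSC)
            ((front.length : Int), pvSC '(')
          = (List.replicate (stkS ++ [front.length]).length "(",
             pad ++ (stkS ++ [front.length]).map (fun k => some ((k : Nat) : Int)),
             (front ++ [pvSC '(']) ++ t.map pvSC) := by
        simp only [pvStepA]
        rw [if_pos (by simp [pvSC_open])]
        refine Prod.ext ?_ (Prod.ext ?_ ?_) <;>
          simp [pvSC_open, List.replicate_succ']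
      rw [hstep, hlen (pvSC '(')]
      rw [ih (front ++ [pvSC '(']) (stkS ++ [front.length]) pad
        (by intro k hk
            simp only [List.mem_append, List.mem_singleton] at hk
            rcases hk with hk | hk
            · have := hbnd k hk; simp; omega
            · simp [hk])
        (by rw [List.pairwise_append]
            exact ⟨hpw, by simp, by intro x hx y hy; simp at hy; subst hy; exact hbnd x hx⟩)]
      by_cases h0 : pvRcount t 0 = 0
      · have hg : pvG 0 t = 0 := by rw [pvG_eq]; omega
        have hg2 : pvG 0 ('(' :: t) = 0 := by rw [pvG_open, pvG_eq]; omega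
        rw [hg, hg2]
        simp [pvZero, pvL, h0, pvSC_open]
      · obtain ⟨m, hm⟩ : ∃ m, pvRcount t 0 = m + 1 := ⟨pvRcount t 0 - 1, by omega⟩
        have hg : pvG 0 t = m + 1 := by rw [pvG_eq]; omega
        have hg2 : pvG 0 ('(' :: t) = m := by rw [pvG_open, pvG_eq]; omega
        rw [hg, hg2]
        have hdp : (stkS ++ [front.length]).drop ((stkS ++ [front.length]).length - (m + 1))
            = stkS.drop (stkS.length - m) ++ [front.length] := by
          have hi : (stkS ++ [front.length]).length - (m + 1) = stkS.length - m := by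
            simp
          rw [hi, List.drop_append]
          have h2 : stkS.length - m - stkS.length = 0 := by omega
          rw [h2]
          simp
        rw [hdp, pvZero_concat]
        have hsub : ∀ k ∈ stkS.drop (stkS.length - m), k < front.length := by
          intro k hk; exact hbnd k (List.mem_of_mem_drop hk)
        rw [pvZero_append [pvSC '('] _ front hsub]
        have hzl : (pvZero front (stkS.drop (stkS.length - m))).length = front.length := by
          simp [pvZero_length]
        have hset : (pvZero front (stkS.drop (stkS.length - m)) ++ [pvSC '(']).set
              front.length "0"
            = pvZero front (stkS.drop (stkS.length - m)) ++ ["0"] := by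
          rw [← hzl]
          have := pvSetMid (pvZero front (stkS.drop (stkS.length - m))) [] (pvSC '(') "0"
          simpa using this
        rw [hset]
        simp [pvL, hm]
    · by_cases hc2 : c = ')'
      · subst hc2
        rcases stkS.eq_nil_or_concat with rfl | ⟨S', j, rfl⟩
        · -- unmatched close
          have hstep : pvStepA (List.replicate ([] : List Nat).length "(",
                pad ++ ([] : List Nat).map (fun k => some ((k : Nat) : Int)), front ++ pvSC ')' :: t.map pvSC)
                ((front.length : Int), pvSC ')')
              = (List.replicate ([] : List Nat).length "(",
                 pad ++ ([] : List Nat).map (fun k => some ((k : Nat) : Int)),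
                 (front ++ ["-1"]) ++ t.map pvSC) := by
            simp only [pvStepA]
            rw [if_neg (by simp [pvSC_eq_paren]), if_pos (by simp [pvSC_close])]
            rw [if_pos (by simp)]
            refine Prod.ext rfl (Prod.ext rfl ?_)
            have := pvSetMid front (t.map pvSC) (pvSC ')') "-1"
            simpa using this
          rw [hstep, hlen "-1"]
          rw [ih (front ++ ["-1"]) [] pad (by simp) (by simp)]
          simp [pvZero, pvL, pvG_close]
        · -- pop
          simp only [List.concat_eq_append] at hbnd hpw ⊢
          have hjlt : j < front.length := hbnd j (by simp)
          have hjnot : j ∉ S' := by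
            rw [List.pairwise_append] at hpw
            intro hj
            exact absurd (hpw.2.2 j hj j (by simp)) (lt_irrefl j)
          have hn : (S' ++ [j]).length = S'.length + 1 := by simp
          have hstep : pvStepA (List.replicate (S' ++ [j]).length "(",
                pad ++ (S' ++ [j]).map (fun k => some ((k : Nat) : Int)), front ++ pvSC ')' :: t.map pvSC)
                ((front.length : Int), pvSC ')')
              = (List.replicate S'.length "(",
                 pad ++ S'.map (fun k => some ((k : Nat) : Int)),
                 ((front.set j "0" ++ ["1"]) ++ t.map pvSC)) := by
            simp only [pvStepA]
            rw [if_neg (by simp [pvSC_eq_paren]), if_pos (by simp [pvSC_close])]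
            rw [if_neg (by simp)]
            have hlast : (pad ++ (S' ++ [j]).map (fun k => some ((k : Nat) : Int))).getLast?
                = some (some (j : Int)) := by
              rw [List.map_append, ← List.append_assoc]
              exact List.getLast?_concat
            refine Prod.ext ?_ (Prod.ext ?_ ?_)
            · simp [hn, List.replicate_succ']
            · rw [List.map_append, ← List.append_assoc]
              simp
            · simp only [hlast]
              simp only [Option.getD_some, Int.toNat_natCast]
              have h1 : (front ++ pvSC ')' :: t.map pvSC).set j "0"
                  = front.set j "0" ++ pvSC ')' :: t.map pvSC :=
                pvSetLeft front _ j "0" hjlt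
              rw [h1]
              have h2 := pvSetMid (front.set j "0") (t.map pvSC) (pvSC ')') "1"
              simp only [List.length_set] at h2
              simp [h2]
          rw [hstep]
          have hlen2 : ((front.length : Int) + 1) = (((front.set j "0" ++ ["1"]).length : Int)) := by
            simp
          rw [hlen2]
          rw [ih (front.set j "0" ++ ["1"]) S' pad
            (by intro k hk; have := hbnd k (by simp [hk]); simp; omega)
            ((List.pairwise_append.mp hpw).1)]
          have hsub : ∀ k ∈ S'.drop (S'.length - pvG 0 t), k < (front.set j "0").length := by
            intro k hk
            have := hbnd k (by simp [List.mem_of_mem_drop hk])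
            simpa using this
          rw [pvZero_append ["1"] _ _ hsub]
          rw [pvZero_set_comm "0" _ front j (fun hj => hjnot (List.mem_of_mem_drop hj))]
          have hg2 : pvG 0 (')' :: t) = pvG 0 t + 1 := by
            rw [pvG_close]; simp
          rw [hg2]
          have hdp : (S' ++ [j]).drop ((S' ++ [j]).length - (pvG 0 t + 1))
              = S'.drop (S'.length - pvG 0 t) ++ [j] := by
            have hi : (S' ++ [j]).length - (pvG 0 t + 1) = S'.length - pvG 0 t := by
              simp
            rw [hi, List.drop_append]
            have h2 : S'.length - pvG 0 t - S'.length = 0 := by omega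
            rw [h2]
            simp
          rw [hdp, pvZero_concat]
          simp [pvL, hn]
      · -- ordinary character
        have hstep : pvStepA (List.replicate stkS.length "(",
              pad ++ stkS.map (fun k => some ((k : Nat) : Int)), front ++ pvSC c :: t.map pvSC)
              ((front.length : Int), pvSC c)
            = (List.replicate stkS.length "(",
               pad ++ stkS.map (fun k => some ((k : Nat) : Int)),
               (front ++ [pvSC c]) ++ t.map pvSC) := by
          simp only [pvStepA]
          rw [if_neg (by simp [pvSC_eq_paren, hc]), if_neg (by simp [pvSC_eq_close, hc2])]
          refine Prod.ext rfl (Prod.ext rfl ?_)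
          have := pvSetMid front (t.map pvSC) (pvSC c) (pvSC c)
          simpa using this
        rw [hstep, hlen (pvSC c)]
        rw [ih (front ++ [pvSC c]) stkS pad
          (by intro k hk; have := hbnd k hk; simp; omega) hpw]
        have hg2 : pvG 0 (c :: t) = pvG 0 t := pvG_other c hc hc2 0 t
        rw [hg2]
        have hsub : ∀ k ∈ stkS.drop (stkS.length - pvG 0 t), k < front.length := by
          intro k hk; exact hbnd k (List.mem_of_mem_drop hk)
        rw [pvZero_append [pvSC c] _ front hsub]
        simp [pvL, hc, hc2]

-- ===== B-side: pass 1 =====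
theorem pvB1_loop : ∀ (t : List Char) (front : List String) (b : Nat),
    ((PySem.List.enumerate t (front.length : Int)).foldl pvStepB1 (front ++ t.map pvSC, (b : Int))).1
    = front ++ pvP1 t b := by
  intro t
  induction t with
  | nil => intro front b; simp [PySem.List.enumerate, pvP1]
  | cons c t ih =>
    intro front b
    rw [PySem.List.enumerate_cons, List.foldl_cons]
    have hlen : ∀ x : String, ((front.length : Int) + 1) = (((front ++ [x]).length : Int)) := by
      intro x; simp
    by_cases hc : c = '('
    · have hstep : pvStepB1 (front ++ (c :: t).map pvSC, (b : Int)) ((front.length : Int), c)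
          = ((front ++ [pvSC c]) ++ t.map pvSC, ((b + 1 : Nat) : Int)) := by
        simp [pvStepB1, hc]
      rw [hstep, hlen (pvSC c), ih (front ++ [pvSC c]) (b + 1)]
      simp [pvP1, hc]
    · by_cases hc2 : c = ')'
      · by_cases hb : b = 0
        · have hstep : pvStepB1 (front ++ (c :: t).map pvSC, (b : Int)) ((front.length : Int), c)
              = ((front ++ ["-1"]) ++ t.map pvSC, (b : Int)) := by
            simp only [pvStepB1, List.map_cons]
            rw [if_neg (by simp [pvSC_eq_paren, hc, hc2]), if_pos (by simp [pvSC_eq_close, hc2])]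
            rw [if_neg (by simp [hb])]
            refine Prod.ext ?_ rfl
            have := pvSetMid front (List.map pvSC t) (pvSC c) "-1"
            simpa using this
          rw [hstep, hlen "-1", ih (front ++ ["-1"]) b]
          simp [pvP1, hc, hc2, hb]
        · have hstep : pvStepB1 (front ++ (c :: t).map pvSC, (b : Int)) ((front.length : Int), c)
              = ((front ++ ["1"]) ++ t.map pvSC, ((b - 1 : Nat) : Int)) := by
            simp only [pvStepB1, List.map_cons]
            rw [if_neg (by simp [pvSC_eq_paren, hc, hc2]), if_pos (by simp [pvSC_eq_close, hc2])]
            rw [if_pos (by exact_mod_cast Nat.pos_of_ne_zero hb)]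
            refine Prod.ext ?_ ?_
            · have := pvSetMid front (List.map pvSC t) (pvSC c) "1"
              simpa using this
            · simp; omega
          rw [hstep, hlen "1", ih (front ++ ["1"]) (b - 1)]
          simp [pvP1, hc, hc2, hb]
      · have hstep : pvStepB1 (front ++ (c :: t).map pvSC, (b : Int)) ((front.length : Int), c)
            = ((front ++ [pvSC c]) ++ t.map pvSC, (b : Int)) := by
          simp only [pvStepB1, List.map_cons]
          rw [if_neg (by simp [pvSC_eq_paren, hc]), if_neg (by simp [pvSC_eq_close, hc2])]
          simp
        rw [hstep, hlen (pvSC c), ih (front ++ [pvSC c]) b]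
        simp [pvP1, hc, hc2]

-- ===== B-side: pass 2 =====
theorem pvM2_concat : ∀ (es : List Char) (u : List String) (c : Char) (o : String) (r : Nat),
    u.length = es.length →
    pvM2 (es ++ [c]) r (u ++ [o])
      = pvM2 es (if c = ')' then r + 1 else if c = '(' then r - 1 else r) u
        ++ [if c = '(' then (if r > 0 then "0" else "-1") else o] := by
  intro es
  induction es with
  | nil =>
    intro u c o r hu
    have : u = [] := List.eq_nil_of_length_eq_zero hu
    subst this
    simp [pvM2, pvRcount]
  | cons e es ih =>
    intro u c o r hu
    cases u with
    | nil => simp at hu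
    | cons p u' =>
      simp only [List.cons_append, pvM2]
      rw [ih u' c o r (by simpa using hu), pvRcount_concat]

theorem pvB2_loop : ∀ (ds : List Char) (out : List String) (r : Nat), ds.length ≤ out.length →
    ((PySem.List.enumerate ds 0).reverse.foldl pvStepB2 (out, (r : Int)))
    = (pvM2 ds r (out.take ds.length) ++ out.drop ds.length, (pvRcount ds r : Int)) := by
  intro ds
  induction ds using List.reverseRecOn with
  | nil => intro out r _; simp [PySem.List.enumerate, pvM2, pvRcount]
  | append_singleton es c ih =>
    intro out r hlen
    have hm : es.length < out.length := by simpa using hlen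
    rw [PySem.List.enumerate_append]
    have henum1 : PySem.List.enumerate [c] (0 + (es.length : Int)) = [((es.length : Int), c)] := by
      simp [PySem.List.enumerate_cons, PySem.List.enumerate]
    rw [henum1, List.reverse_append]
    simp only [List.reverse_cons, List.reverse_nil, List.nil_append, List.singleton_append,
      List.foldl_cons]
    have htake : out.take (es.length + 1) = out.take es.length ++ [out[es.length]] := by
      rw [List.take_succ]
      simp [List.getElem?_eq_getElem hm]
    have hdrop : out.drop es.length = out[es.length] :: out.drop (es.length + 1) :=
      List.drop_eq_getElem_cons hm
    have hulen : (out.take es.length).length = es.length := by simp; omega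
    have hl2 : (es ++ [c]).length = es.length + 1 := by simp
    by_cases hc : c = ')'
    · have hstep : pvStepB2 (out, (r : Int)) ((es.length : Int), c) = (out, ((r + 1 : Nat) : Int)) := by
        simp [pvStepB2, hc]
      rw [hstep, ih out (r + 1) (le_of_lt hm)]
      rw [pvRcount_concat]
      refine Prod.ext ?_ (by simp [hc])
      simp only
      rw [hl2, htake, pvM2_concat es _ c _ r hulen, hdrop]
      simp [hc]
    · by_cases hc2 : c = '('
      · by_cases hr : r = 0
        · have hstep : pvStepB2 (out, (r : Int)) ((es.length : Int), c)
              = (out.set es.length "-1", (r : Int)) := by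
            simp only [pvStepB2]
            rw [if_neg (by simp [hc]), if_pos (by simp [hc2]), if_neg (by simp [hr])]
            simp
          rw [hstep, ih (out.set es.length "-1") r (by simpa using le_of_lt hm)]
          rw [pvRcount_concat]
          refine Prod.ext ?_ (by simp [hc, hc2, hr])
          simp only
          have h1 : (out.set es.length "-1").take es.length = out.take es.length := by
            rw [List.take_set]
            exact List.set_eq_of_length_le (by simp)
          have h2 : (out.set es.length "-1").drop es.length = "-1" :: out.drop (es.length + 1) := by
            rw [List.drop_set, if_neg (lt_irrefl es.length), Nat.sub_self, hdrop]
            rfl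
          rw [h1, h2, hl2, htake, pvM2_concat es _ c _ r hulen]
          simp [hc, hc2, hr]
        · have hstep : pvStepB2 (out, (r : Int)) ((es.length : Int), c)
              = (out.set es.length "0", ((r - 1 : Nat) : Int)) := by
            simp only [pvStepB2]
            rw [if_neg (by simp [hc]), if_pos (by simp [hc2]),
              if_pos (by exact_mod_cast Nat.pos_of_ne_zero hr)]
            refine Prod.ext (by simp) (by simp; omega)
          rw [hstep, ih (out.set es.length "0") (r - 1) (by simpa using le_of_lt hm)]
          rw [pvRcount_concat]
          refine Prod.ext ?_ (by simp [hc, hc2])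
          simp only
          have h1 : (out.set es.length "0").take es.length = out.take es.length := by
            rw [List.take_set]
            exact List.set_eq_of_length_le (by simp)
          have h2 : (out.set es.length "0").drop es.length = "0" :: out.drop (es.length + 1) := by
            rw [List.drop_set, if_neg (lt_irrefl es.length), Nat.sub_self, hdrop]
            rfl
          rw [h1, h2, hl2, htake, pvM2_concat es _ c _ r hulen]
          have : (r > 0) = True := by simp; omega
          simp [hc, hc2, this]
      · have hstep : pvStepB2 (out, (r : Int)) ((es.length : Int), c) = (out, (r : Int)) := by
          simp [pvStepB2, hc, hc2]
        rw [hstep, ih out r (le_of_lt hm)]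
        rw [pvRcount_concat]
        refine Prod.ext ?_ (by simp [hc, hc2])
        simp only
        rw [hl2, htake, pvM2_concat es _ c _ r hulen, hdrop]
        simp [hc, hc2]

theorem pvP1_length (cs : List Char) : ∀ b, (pvP1 cs b).length = cs.length := by
  induction cs with
  | nil => intro b; rfl
  | cons c t ih => intro b; simp [pvP1, ih]

theorem pvM2_eq_pvL (cs : List Char) : ∀ b, pvM2 cs 0 (pvP1 cs b) = pvL "-1" "0" cs b := by
  induction cs with
  | nil => intro b; rfl
  | cons c t ih =>
    intro b
    by_cases hc : c = '('
    · have : (pvRcount t 0 > 0) = (¬ (pvRcount t 0 = 0)) := by simp; omega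
      simp [pvP1, pvM2, pvL, hc, ih]
      by_cases h0 : pvRcount t 0 = 0 <;> simp [h0] <;> omega
    · by_cases hc2 : c = ')'
      · simp [pvP1, pvM2, pvL, hc, hc2, ih]
      · simp [pvP1, pvM2, pvL, hc, hc2, ih]

-- ===== replace with a single-char pattern acts characterwise =====
theorem pvReplaceGo (new : List Char) : ∀ (l : List Char) (fuel : Nat) (acc : List Char),
    l.length ≤ fuel →
    PySem.Chars.replace.go ['('] new fuel l acc
      = acc.reverse ++ l.flatMap (fun c => if c = '(' then new else [c]) := by
  intro l
  induction l with
  | nil =>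
    intro fuel acc _
    cases fuel <;> simp [PySem.Chars.replace.go]
  | cons c t ih =>
    intro fuel acc hf
    cases fuel with
    | zero => simp at hf
    | succ m =>
      rw [PySem.Chars.replace.go]
      by_cases hc : c = '('
      · have hpre : List.isPrefixOf ['('] (c :: t) = true := by
          simp [List.isPrefixOf, hc]
        rw [if_pos hpre]
        simp only [List.length_singleton, List.drop_succ_cons, List.drop_zero]
        rw [ih m (new.reverse ++ acc) (by simpa using hf)]
        simp [hc]
      · have hpre : List.isPrefixOf ['('] (c :: t) = false := by
          simp [List.isPrefixOf]
          intro h; exact absurd h.symm hc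
        rw [if_neg (by simp [hpre])]
        rw [ih m (c :: acc) (by simpa using hf)]
        simp [hc]

theorem pvReplaceChar (l : List Char) :
    PySem.Chars.replace l ['('] ['-', '1']
      = l.flatMap (fun c => if c = '(' then ['-', '1'] else [c]) := by
  rw [PySem.Chars.replace]
  simp only [List.isEmpty_cons, if_false]
  exact (by simpa using pvReplaceGo ['-', '1'] l l.length [] le_rfl)

-- join with empty separator is flatten
theorem pvJoinNil (l : List (List Char)) : PySem.Chars.join [] l = l.flatten := by
  unfold PySem.Chars.join
  induction l with
  | nil => rfl
  | cons a t ih => cases t <;> simp_all [List.intercalate, List.intersperse]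

-- replacing "(" by "-1" in the joined A-labels yields the B-labels
theorem pvFlat_pvL (cs : List Char) : ∀ b,
    (((pvL "(" "0" cs b).map String.toList).flatten).flatMap (fun c => if c = '(' then ['-', '1'] else [c])
    = ((pvL "-1" "0" cs b).map String.toList).flatten := by
  induction cs with
  | nil => intro b; rfl
  | cons c t ih =>
    intro b
    simp only [pvL, List.map_cons, List.flatten_cons, List.flatMap_append]
    rw [ih]
    congr 1
    by_cases hc : c = '('
    · by_cases h0 : pvRcount t 0 = 0 <;> simp [hc, h0] <;> decide
    · by_cases hc2 : c = ')'
      · by_cases hb : b = 0 <;> simp [hc, hc2, hb] <;> decide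
      · simp only [hc, hc2, if_false]
        have : (pvSC c).toList = [c] := by simp [pvSC, String.toList_ofList]
        simp [this, hc]

theorem pvA_eval (a : String) :
    brackets_evaluation a
      = PySem.Str.replace (PySem.Str.join "" (pvL "(" "0" a.toList 0)) "(" "-1" := by
  show PySem.Str.replace (PySem.Str.join ""
      ((PySem.List.enumerate (a.toList.map pvSC)).foldl pvStepA
        ([], List.replicate (a.toList.map pvSC).length none, a.toList.map pvSC)).2.2) "(" "-1"
    = PySem.Str.replace (PySem.Str.join "" (pvL "(" "0" a.toList 0)) "(" "-1"
  have hA := pvA_loop a.toList [] [] (List.replicate (a.toList.map pvSC).length none)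
    (by simp) (by simp)
  simp only [List.length_nil, Nat.cast_zero, List.replicate_zero, List.map_nil,
    List.append_nil, List.nil_append, List.drop_nil, List.length_map] at hA
  simp only [List.length_map]
  rw [hA]
  rfl

theorem pvB_eval (a : String) :
    brackets_evaluation_alt a = PySem.Str.join "" (pvL "-1" "0" a.toList 0) := by
  show PySem.Str.join "" (((PySem.List.enumerate a.toList).reverse).foldl pvStepB2
      (((PySem.List.enumerate a.toList).foldl pvStepB1 (a.toList.map pvSC, 0)).1, 0)).1
    = PySem.Str.join "" (pvL "-1" "0" a.toList 0)
  have hB1 := pvB1_loop a.toList [] 0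
  simp only [List.length_nil, Nat.cast_zero, List.nil_append] at hB1
  rw [hB1]
  have hlen : a.toList.length ≤ (pvP1 a.toList 0).length := by rw [pvP1_length]
  have hB2 := pvB2_loop a.toList (pvP1 a.toList 0) 0 hlen
  simp only [Nat.cast_zero] at hB2
  rw [hB2]
  have ht : (pvP1 a.toList 0).take a.toList.length = pvP1 a.toList 0 := by
    apply List.take_of_length_le
    rw [pvP1_length]
  have hd : (pvP1 a.toList 0).drop a.toList.length = [] := by
    apply List.drop_eq_nil_of_le
    rw [pvP1_length]
  rw [ht, hd, List.append_nil, pvM2_eq_pvL]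

-- ===== VERDICT (by name: the statement is the Claim_ definition above) =====
theorem brackets_evaluation_spec : Claim_equal_brackets_evaluation := by
  intro a _
  unfold Spec_brackets_evaluation
  refine String.toList_inj.mp ?_
  rw [pvA_eval, pvB_eval]
  rw [PySem.Str.toList_replace, PySem.Str.toList_join, PySem.Str.toList_join]
  have hp : ("(" : String).toList = ['('] := rfl
  have hm : ("-1" : String).toList = ['-', '1'] := rfl
  have he : ("" : String).toList = [] := rfl
  rw [hp, hm, he, pvJoinNil, pvJoinNil, pvReplaceChar, pvFlat_pvL]
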